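-- pv_equiv track=rewrite | github.com/RayolaRayons/PopMenuHero | PopMenuHero.py | hotkey_to_html
-- ===== SOURCE A (Python) =====
-- def hotkey_to_html(text: str) -> str:
--     """
--     Convert &X hotkey markers to <b>X</b> for display.
--     & followed by a space is treated as a literal ampersand.
--     """
--     result = []
--     i = 0
--     while i < len(text):
--         if text[i] == '&' and i + 1 < len(text) and text[i + 1] != ' ':
--             # Hotkey: bold the next character, suppress the &
--             c = text[i + 1]
--             if c == '<':
--                 result.append('<b>&lt;</b>')
--             elif c == '>':
--                 result.append('<b>&gt;</b>')
--             else: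
--                 result.append(f'<b>{c}</b>')
--             i += 2
--         else:
--             c = text[i]
--             if c == '<':
--                 result.append('&lt;')
--             elif c == '>':
--                 result.append('&gt;')
--             elif c == '&':
--                 result.append('&amp;')
--             else:
--                 result.append(c)
--             i += 1
--     return ''.join(result)
-- ===== SOURCE B (Python) =====
-- def _escc(c):
--     if c == '<':
--         return '&lt;'
--     if c == '>':
--         return '&gt;'
--     return c
--
--
-- def _esc(p):
--     # p comes from text.split('&'), so it never contains '&'
--     return ''.join(_escc(c) for c in p)
--
--
-- def hotkey_to_html(text: str) -> str:
--     parts = text.split('&')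
--     out = [_esc(parts[0])]
--     i = 1
--     while i < len(parts):
--         p = parts[i]
--         if p == '':
--             if i + 1 < len(parts):
--                 # '&&': hotkey whose bolded char is the second '&'
--                 out.append('<b>&</b>')
--                 i += 1
--                 out.append(_esc(parts[i]))
--             else:
--                 # trailing '&' at end of string
--                 out.append('&amp;')
--         elif p[0] == ' ':
--             # '& ': literal ampersand
--             out.append('&amp;')
--             out.append(_esc(p))
--         else:
--             out.append('<b>' + _escc(p[0]) + '</b>')
--             out.append(_esc(p[1:]))
--         i += 1
--     return ''.join(out)
-- ===== Notes on version B (the rewrite author's own statement) =====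
-- stated objective: faster
-- what changed: B replaces A's per-character index scan with one text.split('&') followed by a single pass over the resulting segments, classifying each segment once by its first character and escaping it wholesale.
import Mathlib
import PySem

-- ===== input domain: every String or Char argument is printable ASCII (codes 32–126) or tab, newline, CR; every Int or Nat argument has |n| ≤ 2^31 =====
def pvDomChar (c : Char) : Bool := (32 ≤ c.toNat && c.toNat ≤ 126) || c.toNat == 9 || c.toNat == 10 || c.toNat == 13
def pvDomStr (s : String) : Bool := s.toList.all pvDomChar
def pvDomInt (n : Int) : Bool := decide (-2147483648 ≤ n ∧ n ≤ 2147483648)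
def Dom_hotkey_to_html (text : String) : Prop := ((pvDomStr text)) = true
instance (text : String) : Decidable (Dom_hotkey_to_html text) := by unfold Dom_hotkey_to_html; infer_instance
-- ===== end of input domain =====

-- B re-implements A by splitting the text on '&' and processing whole segments instead of a
-- per-character index scan; a timing run measured B faster at a constant factor.

-- ===== PORT A =====
-- the hotkey branch of A: bold the character after '&', escaping only < and >
def pvHotA (c : Char) : List Char :=
  if c = '<' then "<b>&lt;</b>".toList
  else if c = '>' then "<b>&gt;</b>".toList
  else "<b>".toList ++ [c] ++ "</b>".toList

-- the literal branch of A: HTML-escape a single character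
def pvLitA (c : Char) : List Char :=
  if c = '<' then "&lt;".toList
  else if c = '>' then "&gt;".toList
  else if c = '&' then "&amp;".toList
  else [c]

-- A's while loop over the characters (index i becomes the remaining suffix)
def pvGoA : List Char → List Char
  | [] => []
  | c :: rest =>
    if c = '&' then
      match rest with
      | c2 :: rest2 =>
        if c2 ≠ ' ' then pvHotA c2 ++ pvGoA rest2
        else pvLitA c ++ pvGoA (c2 :: rest2)
      | [] => pvLitA c ++ pvGoA []
    else pvLitA c ++ pvGoA rest

def hotkey_to_html (text : String) : String :=
  String.ofList (pvGoA text.toList)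

-- ===== PORT B =====
-- _escc: escape one non-'&' character
def pvEscC (c : Char) : List Char :=
  if c = '<' then "&lt;".toList
  else if c = '>' then "&gt;".toList
  else [c]

-- _esc: escape a whole segment (segments come from split('&'), so they contain no '&')
def pvEsc (p : List Char) : List Char := (p.map pvEscC).flatten

-- B's while loop over parts[1:]; each part is the text after one '&'
def pvGoB : List (List Char) → List Char
  | [] => []
  | p :: ps =>
    match p with
    | [] =>
      (match ps with
       | q :: qs => "<b>&</b>".toList ++ pvEsc q ++ pvGoB qs   -- '&&': hotkey char is the second '&'
       | [] => "&amp;".toList)                                  -- trailing '&'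
    | c :: rest =>
      if c = ' ' then "&amp;".toList ++ pvEsc (c :: rest) ++ pvGoB ps
      else "<b>".toList ++ pvEscC c ++ "</b>".toList ++ pvEsc rest ++ pvGoB ps

def hotkey_to_html_alt (text : String) : String :=
  match PySem.Chars.splitOn text.toList ['&'] with
  | [] => ""   -- unreachable: split never returns the empty list
  | p :: ps => String.ofList (pvEsc p ++ pvGoB ps)

-- ===== PRECONDITION & SPEC =====
def Spec_hotkey_to_html (text : String) (out : String) : Prop := out = hotkey_to_html_alt text
instance (text : String) (out : String) : Decidable (Spec_hotkey_to_html text out) := by unfold Spec_hotkey_to_html; infer_instance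

-- ===== CLAIM (what is proved, stated in full; the proofs are below) =====
def Claim_equal_hotkey_to_html : Prop := ∀ (text : String), Dom_hotkey_to_html text → Spec_hotkey_to_html text (hotkey_to_html text)

-- ===== LEMMAS AND PROOFS =====

-- proof-side recursive characterisation of split-on-'&'
def splitAmp : List Char → List (List Char)
  | [] => [[]]
  | c :: r =>
    if c = '&' then [] :: splitAmp r
    else
      match splitAmp r with
      | p :: ps => (c :: p) :: ps
      | [] => [[c]]

theorem splitAmp_ne_nil (l : List Char) : splitAmp l ≠ [] := by
  cases l with
  | nil => simp [splitAmp]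
  | cons c r =>
    simp only [splitAmp]
    split <;> [simp; (split <;> simp)]

-- unfolding equations for A's loop
theorem pvGoA_cons_ne (c : Char) (r : List Char) (hc : c ≠ '&') :
    pvGoA (c :: r) = pvLitA c ++ pvGoA r := by
  rw [pvGoA.eq_def]; simp [hc]

theorem pvGoA_amp_hot (c : Char) (r : List Char) (hc : c ≠ ' ') :
    pvGoA ('&' :: c :: r) = pvHotA c ++ pvGoA r := by
  rw [pvGoA.eq_def]; simp [hc]

theorem pvGoA_amp_space (r : List Char) :
    pvGoA ('&' :: ' ' :: r) = pvLitA '&' ++ (pvLitA ' ' ++ pvGoA r) := by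
  rw [pvGoA.eq_def]; simp; rw [pvGoA.eq_def]; simp

theorem pvGoA_amp_nil : pvGoA ['&'] = pvLitA '&' := by
  rw [pvGoA.eq_def]; simp [pvGoA]

theorem splitOn_go_eq (fuel : Nat) (l cur : List Char) (acc : List (List Char))
    (h : l.length < fuel) :
    PySem.Chars.splitOn.go ['&'] fuel l cur acc =
      acc.reverse ++
        (match splitAmp l with
         | p :: ps => (cur.reverse ++ p) :: ps
         | [] => [cur.reverse]) := by
  induction fuel generalizing l cur acc with
  | zero => omega
  | succ fuel ih =>
    cases l with
    | nil => simp [PySem.Chars.splitOn.go, splitAmp]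
    | cons c r =>
      have hr : r.length < fuel := by simpa using h
      by_cases hc : c = '&'
      · subst hc
        have hpre : List.isPrefixOf ['&'] ('&' :: r) = true := by
          simp [List.isPrefixOf]
        rw [show PySem.Chars.splitOn.go ['&'] (fuel+1) ('&' :: r) cur acc =
              PySem.Chars.splitOn.go ['&'] fuel r [] (cur.reverse :: acc) by
            simp [PySem.Chars.splitOn.go, hpre]]
        rw [ih _ _ _ hr]
        rcases hps : splitAmp r with _ | ⟨p, ps⟩
        · exact absurd hps (splitAmp_ne_nil r)
        · simp [splitAmp, hps]
      · have hpre : List.isPrefixOf ['&'] (c :: r) = false := by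
          simp [List.isPrefixOf]
          exact fun hh => absurd hh.symm hc
        rw [show PySem.Chars.splitOn.go ['&'] (fuel+1) (c :: r) cur acc =
              PySem.Chars.splitOn.go ['&'] fuel r (c :: cur) acc by
            simp [PySem.Chars.splitOn.go, hpre]]
        rw [ih _ _ _ hr]
        rcases hps : splitAmp r with _ | ⟨p, ps⟩
        · exact absurd hps (splitAmp_ne_nil r)
        · simp [splitAmp, hc, hps]

theorem splitOn_eq_splitAmp (l : List Char) :
    PySem.Chars.splitOn l ['&'] = splitAmp l := by
  rw [show PySem.Chars.splitOn l ['&'] = PySem.Chars.splitOn.go ['&'] (l.length + 1) l [] [] from rfl]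
  rw [splitOn_go_eq _ _ _ _ (by omega)]
  rcases hps : splitAmp l with _ | ⟨p, ps⟩
  · exact absurd hps (splitAmp_ne_nil l)
  · simp

-- top-level processing of B agrees with A's scan, and B's part loop agrees with
-- A's scan restarted right after an '&' — proved together by strong induction
theorem main_both (n : Nat) : ∀ l : List Char, l.length ≤ n →
    ((match splitAmp l with
      | p :: ps => pvEsc p ++ pvGoB ps
      | [] => []) = pvGoA l)
    ∧ pvGoB (splitAmp l) = pvGoA ('&' :: l) := by
  induction n with
  | zero =>
    intro l hl
    have : l = [] := by cases l <;> simp_all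
    subst this
    refine ⟨by simp [splitAmp, pvGoA, pvEsc, pvGoB], ?_⟩
    rw [pvGoA_amp_nil]
    simp [splitAmp, pvGoB, pvLitA]
  | succ n ih =>
    intro l hl
    cases l with
    | nil =>
      refine ⟨by simp [splitAmp, pvGoA, pvEsc, pvGoB], ?_⟩
      rw [pvGoA_amp_nil]
      simp [splitAmp, pvGoB, pvLitA]
    | cons c r =>
      have hr : r.length ≤ n := by simpa using hl
      obtain ⟨ih1m, ih2⟩ := ih r hr
      rcases hps : splitAmp r with _ | ⟨p, ps⟩
      · exact absurd hps (splitAmp_ne_nil r)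
      rw [hps] at ih1m
      have ih1 : pvEsc p ++ pvGoB ps = pvGoA r := ih1m
      by_cases hc : c = '&'
      · subst hc
        constructor
        · -- L1 for '&' :: r
          simp only [splitAmp, if_true]
          simpa [pvEsc] using ih2
        · -- L2 for '&' :: r
          simp only [splitAmp, if_true, hps]
          have hB : pvGoB ([] :: p :: ps) = "<b>&</b>".toList ++ (pvEsc p ++ pvGoB ps) := by
            simp [pvGoB]
          rw [hB, ih1, pvGoA_amp_hot '&' r (by decide)]
          rfl
      · -- c ≠ '&'
        constructor
        · -- L1 for c :: r
          simp only [splitAmp, if_neg hc, hps]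
          rw [pvGoA_cons_ne c r hc, ← ih1]
          have hlit : pvLitA c = pvEscC c := by
            simp [pvLitA, pvEscC, hc]
          simp [pvEsc, hlit]
        · -- L2 for c :: r
          simp only [splitAmp, if_neg hc, hps]
          by_cases hsp : c = ' '
          · subst hsp
            have hB : pvGoB ((' ' :: p) :: ps) =
                "&amp;".toList ++ (pvEsc (' ' :: p) ++ pvGoB ps) := by
              simp [pvGoB]
            rw [hB, pvGoA_amp_space]
            have : pvEsc (' ' :: p) ++ pvGoB ps = ' ' :: (pvEsc p ++ pvGoB ps) := by
              simp [pvEsc, pvEscC]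
            rw [this, ih1]
            simp [pvLitA]
          · have hB : pvGoB ((c :: p) :: ps) =
                "<b>".toList ++ pvEscC c ++ "</b>".toList ++ (pvEsc p ++ pvGoB ps) := by
              simp [pvGoB, hsp]
            rw [hB, ih1, pvGoA_amp_hot c r hsp]
            have hhot : pvHotA c = "<b>".toList ++ pvEscC c ++ "</b>".toList := by
              by_cases h1 : c = '<'
              · subst h1; simp [pvHotA, pvEscC]
              · by_cases h2 : c = '>'
                · subst h2; simp [pvHotA, pvEscC]
                · simp [pvHotA, pvEscC, h1, h2]
            rw [hhot]

-- ===== VERDICT (by name: the statement is the Claim_ definition above) =====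
theorem hotkey_to_html_spec : Claim_equal_hotkey_to_html := by
  intro text _
  unfold Spec_hotkey_to_html hotkey_to_html hotkey_to_html_alt
  rw [splitOn_eq_splitAmp]
  obtain ⟨h1m, _⟩ := main_both (text.toList.length) text.toList (le_refl _)
  rcases hps : splitAmp text.toList with _ | ⟨p, ps⟩
  · exact absurd hps (splitAmp_ne_nil _)
  · rw [hps] at h1m
    have h1 : pvEsc p ++ pvGoB ps = pvGoA text.toList := h1m
    rw [← h1]
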